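-- pv_equiv track=rewrite | github.com/datas-world/github-actions-optimizer | gh_actions_optimizer/shared/security.py | is_sensitive_key
-- ===== SOURCE A (Python) =====
-- def is_sensitive_key(key: str) -> bool:
--     """Check if a key name suggests sensitive data."""
--     sensitive_keywords = [
--         "token",
--         "password",
--         "secret",
--         "key",
--         "auth",
--         "credential",
--         "private",
--         "passwd",
--         "authorization",
--         "bearer",
--     ]
--     return any(
--         key.lower() == keyword
--         or key.lower().endswith("_" + keyword)
--         or key.lower().startswith(keyword + "_")
--         or "_" + keyword + "_" in key.lower()
--         for keyword in sensitive_keywords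
--     )
-- ===== SOURCE B (Python) =====
-- _SENSITIVE_KEYWORDS = frozenset({
--     "token", "password", "secret", "key", "auth",
--     "credential", "private", "passwd", "authorization", "bearer",
-- })
--
--
-- def is_sensitive_key(key: str) -> bool:
--     """Check if a key name suggests sensitive data."""
--     token = []
--     for ch in key.lower() + "_":
--         if ch == "_":
--             if "".join(token) in _SENSITIVE_KEYWORDS:
--                 return True
--             token = []
--         else:
--             token.append(ch)
--     return False
-- ===== Notes on version B (the rewrite author's own statement) =====
-- stated objective: alternative
-- what changed: B makes a single left-to-right pass over the lowered key with an explicit token accumulator, flushing at each underscore (and at a sentinel end underscore) and returning early when the accumulated token is in a frozenset of the ten keywords, instead of A's loop over keywords performing four substring/boundary tests (equality, endswith, startswith, infix) per keyword.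
import Mathlib
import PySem

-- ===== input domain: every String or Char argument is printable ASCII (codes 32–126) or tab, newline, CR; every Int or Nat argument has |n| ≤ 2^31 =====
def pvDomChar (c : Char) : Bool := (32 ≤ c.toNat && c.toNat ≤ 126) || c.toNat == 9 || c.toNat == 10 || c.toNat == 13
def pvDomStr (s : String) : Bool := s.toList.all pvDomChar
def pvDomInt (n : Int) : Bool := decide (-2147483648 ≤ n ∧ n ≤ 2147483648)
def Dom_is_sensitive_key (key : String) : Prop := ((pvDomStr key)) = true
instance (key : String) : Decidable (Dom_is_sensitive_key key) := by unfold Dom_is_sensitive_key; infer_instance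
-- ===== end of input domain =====

-- B makes one left-to-right pass over the lowered key with a token accumulator, flushing at
-- each underscore (plus a sentinel end underscore) against a keyword set, instead of A's loop
-- over keywords with four substring/boundary tests each (objective: alternative).

-- ===== PORT A =====
def pvSensitiveKeywords : List (List Char) :=
  ["token".toList, "password".toList, "secret".toList, "key".toList, "auth".toList,
   "credential".toList, "private".toList, "passwd".toList, "authorization".toList,
   "bearer".toList]

def is_sensitive_key (key : String) : Bool :=
  pvSensitiveKeywords.any (fun keyword =>
    (PySem.Chars.lower key.toList == keyword) ||
    PySem.Chars.endswith (PySem.Chars.lower key.toList) ('_' :: keyword) ||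
    PySem.Chars.startswith (PySem.Chars.lower key.toList) (keyword ++ ['_']) ||
    PySem.Chars.isIn ('_' :: keyword ++ ['_']) (PySem.Chars.lower key.toList))

-- ===== PORT B =====
def pvKeywordSet : PySem.Set (List Char) :=
  PySem.Set.ofList
    ["token".toList, "password".toList, "secret".toList, "key".toList, "auth".toList,
     "credential".toList, "private".toList, "passwd".toList, "authorization".toList,
     "bearer".toList]

-- the for-loop of Source B: chars still to scan, current token accumulator; early return on a hit
def pvScan : List Char → List Char → Bool
  | [], _token => false
  | ch :: rest, token =>
    if ch = '_' then
      if pvKeywordSet.contains token then true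
      else pvScan rest []
    else
      pvScan rest (token ++ [ch])

def is_sensitive_key_alt (key : String) : Bool :=
  pvScan (PySem.Chars.lower key.toList ++ ['_']) []

-- ===== PRECONDITION & SPEC =====
def Spec_is_sensitive_key (key : String) (out : Bool) : Prop := out = is_sensitive_key_alt key
instance (key : String) (out : Bool) : Decidable (Spec_is_sensitive_key key out) := by unfold Spec_is_sensitive_key; infer_instance

-- ===== CLAIM (what is proved, stated in full; the proofs are below) =====
def Claim_equal_is_sensitive_key : Prop := ∀ (key : String), Dom_is_sensitive_key key → Spec_is_sensitive_key key (is_sensitive_key key)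

-- ===== LEMMAS AND PROOFS =====

-- Reference split of a char list on '_' (first token grows until a '_').
def pvSplit : List Char → List (List Char)
  | [] => [[]]
  | c :: rest => if c = '_' then [] :: pvSplit rest else (pvSplit rest).modifyHead (c :: ·)

theorem pvSplit_ne_nil (l : List Char) : ∃ h t, pvSplit l = h :: t := by
  induction l with
  | nil => exact ⟨[], [], rfl⟩
  | cons c rest ih =>
    obtain ⟨h, t, e⟩ := ih
    by_cases hc : c = '_'
    · exact ⟨[], pvSplit rest, by simp [pvSplit, hc]⟩
    · exact ⟨c :: h, t, by simp [pvSplit, hc, e]⟩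

-- The scanner decides whether any '_'-separated token (the head extended by the carried
-- accumulator) lies in the keyword set.
theorem pvScan_eq_any (l : List Char) : ∀ (cur : List Char),
    pvScan (l ++ ['_']) cur
      = ((pvSplit l).modifyHead (cur ++ ·)).any (fun t => pvKeywordSet.contains t) := by
  induction l with
  | nil =>
    intro cur
    simp [pvScan, pvSplit, List.modifyHead]
  | cons c rest ih =>
    intro cur
    obtain ⟨h, t, e⟩ := pvSplit_ne_nil rest
    by_cases hc : c = '_'
    · subst hc
      have := ih []
      rw [e] at this
      simp only [List.modifyHead, List.nil_append] at this
      simp [pvScan, pvSplit, List.modifyHead, this, e]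
    · have := ih (cur ++ [c])
      rw [e] at this
      simp only [List.modifyHead] at this
      simp [pvScan, pvSplit, hc, e, List.modifyHead, this, List.append_assoc]

theorem pvSplit_no_sep (kw : List Char) (h : '_' ∉ kw) : pvSplit kw = [kw] := by
  induction kw with
  | nil => rfl
  | cons c rest ih =>
    have hc : c ≠ '_' := fun e => h (e ▸ List.mem_cons_self)
    have := ih (fun m => h (List.mem_cons_of_mem _ m))
    simp [pvSplit, hc, this, List.modifyHead]

theorem pvSplit_append (pre suf : List Char) :
    pvSplit (pre ++ '_' :: suf) = pvSplit pre ++ pvSplit suf := by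
  induction pre with
  | nil =>
    simp [pvSplit]
  | cons c rest ih =>
    by_cases hc : c = '_'
    · simp [pvSplit, hc, ih]
    · obtain ⟨h, t, e⟩ := pvSplit_ne_nil rest
      simp [pvSplit, hc, ih, e, List.modifyHead]

-- Inverse of the split: join pieces back with '_'.
def pvGlue : List (List Char) → List Char
  | [] => []
  | [x] => x
  | x :: y :: t => x ++ '_' :: pvGlue (y :: t)

theorem pvGlue_pvSplit (l : List Char) : pvGlue (pvSplit l) = l := by
  induction l with
  | nil => rfl
  | cons c rest ih =>
    obtain ⟨h, t, e⟩ := pvSplit_ne_nil rest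
    by_cases hc : c = '_'
    · simp only [pvSplit, hc, if_pos] at *
      rw [e] at ih ⊢
      simp [pvGlue, ih]
    · simp only [pvSplit, hc] at *
      rw [e] at ih ⊢
      cases t with
      | nil => simp_all [pvGlue, List.modifyHead]
      | cons y t' => simp_all [pvGlue, List.modifyHead]

theorem pvGlue_cons_of_ne_nil (x : List Char) (Y : List (List Char)) (hY : Y ≠ []) :
    pvGlue (x :: Y) = x ++ '_' :: pvGlue Y := by
  cases Y with
  | nil => exact absurd rfl hY
  | cons y t => rfl

theorem pvGlue_append (A X : List (List Char)) (hA : A ≠ []) (hX : X ≠ []) :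
    pvGlue (A ++ X) = pvGlue A ++ '_' :: pvGlue X := by
  induction A with
  | nil => exact absurd rfl hA
  | cons a A' ih =>
    cases A' with
    | nil => simpa [pvGlue] using pvGlue_cons_of_ne_nil a X hX
    | cons a2 A'' =>
      rw [List.cons_append, pvGlue_cons_of_ne_nil a ((a2 :: A'') ++ X) (by simp),
        ih (by simp), pvGlue_cons_of_ne_nil a (a2 :: A'') (by simp)]
      simp

-- The heart of the equivalence: for an underscore-free keyword, being a token of the
-- '_'-split is exactly A's four-way boundary test.
theorem token_mem_iff (kw l : List Char) (hkw : '_' ∉ kw) :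
    kw ∈ pvSplit l ↔
      (l = kw ∨ ('_' :: kw) <:+ l ∨ (kw ++ ['_']) <+: l ∨ ('_' :: kw ++ ['_']) <:+: l) := by
  constructor
  · intro hm
    obtain ⟨A, B, e⟩ := List.append_of_mem hm
    have hl : l = pvGlue (A ++ kw :: B) := by rw [← e, pvGlue_pvSplit]
    cases A with
    | nil =>
      cases B with
      | nil => exact Or.inl (by simpa [pvGlue] using hl)
      | cons b B' =>
        refine Or.inr (Or.inr (Or.inl ⟨pvGlue (b :: B'), ?_⟩))
        simp only [List.nil_append] at hl
        rw [hl, pvGlue_cons_of_ne_nil kw (b :: B') (by simp)]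
        simp
    | cons a A' =>
      rw [pvGlue_append (a :: A') (kw :: B) (by simp) (by simp)] at hl
      cases B with
      | nil =>
        refine Or.inr (Or.inl ⟨pvGlue (a :: A'), ?_⟩)
        rw [hl]
        simp [pvGlue]
      | cons b B' =>
        refine Or.inr (Or.inr (Or.inr ⟨pvGlue (a :: A'), pvGlue (b :: B'), ?_⟩))
        rw [hl, pvGlue_cons_of_ne_nil kw (b :: B') (by simp)]
        simp
  · intro h
    rcases h with h1 | ⟨s, hs⟩ | ⟨t, ht⟩ | ⟨s, t, hst⟩
    · rw [h1, pvSplit_no_sep kw hkw]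
      simp
    · rw [← hs, pvSplit_append, pvSplit_no_sep kw hkw]
      simp
    · rw [← ht, show (kw ++ ['_']) ++ t = kw ++ '_' :: t by simp, pvSplit_append,
        pvSplit_no_sep kw hkw]
      simp
    · rw [← hst, show s ++ ('_' :: kw ++ ['_']) ++ t = s ++ '_' :: (kw ++ '_' :: t) by simp,
        pvSplit_append, pvSplit_append, pvSplit_no_sep kw hkw]
      simp

theorem keywords_no_sep : ∀ kw ∈ pvSensitiveKeywords, '_' ∉ kw := by decide

theorem keywordSet_eq : pvKeywordSet = pvSensitiveKeywords := by decide

-- ===== VERDICT (by name: the statement is the Claim_ definition above) =====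
theorem is_sensitive_key_spec : Claim_equal_is_sensitive_key := by
  intro key _
  unfold Spec_is_sensitive_key
  rw [Bool.eq_iff_iff]
  unfold is_sensitive_key is_sensitive_key_alt
  rw [pvScan_eq_any]
  obtain ⟨h, t, e⟩ := pvSplit_ne_nil (PySem.Chars.lower key.toList)
  rw [e]
  simp only [List.modifyHead, List.nil_append, ← e]
  simp only [List.any_eq_true, Bool.or_eq_true, beq_iff_eq,
    PySem.Chars.endswith_iff, PySem.Chars.startswith_iff, PySem.Chars.isIn_iff_infix]
  constructor
  · rintro ⟨kw, hkw, hc⟩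
    refine ⟨kw, (token_mem_iff kw _ (keywords_no_sep kw hkw)).mpr (by tauto), ?_⟩
    rw [keywordSet_eq]
    simpa [PySem.Set.contains] using hkw
  · rintro ⟨tok, htok, hmem⟩
    have hm : tok ∈ pvSensitiveKeywords := by
      rw [keywordSet_eq] at hmem
      simpa [PySem.Set.contains] using hmem
    have := (token_mem_iff tok _ (keywords_no_sep tok hm)).mp htok
    exact ⟨tok, hm, by tauto⟩
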